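-- pv_equiv track=rewrite | github.com/josefdc/GoldbachConjectureVerifier | verifier.py | verifica_goldbach_hasta
-- ===== SOURCE A (Python) =====
-- def es_primo(n):
--     """Verifica si un número es primo."""
--     if n <= 1:
--         return False
--     if n <= 3:
--         return True
--     if n % 2 == 0 or n % 3 == 0:
--         return False
--     i = 5
--     while i * i <= n:
--         if n % i == 0 or n % (i + 2) == 0:
--             return False
--         i += 6
--     return True
--
-- def genera_lista_primos(n):
--     """Genera una lista de números primos hasta n."""
--     return [i for i in range(2, n+1) if es_primo(i)]
--
-- def descomponer_en_primos(n, lista_primos):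
--     """Descompone un número par en dos números primos, si es posible."""
--     for primo in lista_primos:
--         if n - primo in lista_primos:
--             return (primo, n - primo)
--     return None
--
-- def verifica_goldbach_hasta(n):
--     """Verifica la conjetura de Goldbach hasta un número n."""
--     primos_hasta_n = genera_lista_primos(n)
--     resultados = {}
--     for i in range(4, n + 1, 2):  # Solo consideramos números pares.
--         descomposicion = descomponer_en_primos(i, primos_hasta_n)
--         if descomposicion:
--             resultados[i] = descomposicion
--         else:
--             raise ValueError(f"La conjetura de Goldbach no se cumple para {i}!")
--     return resultados
-- ===== SOURCE B (Python) =====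
-- def verifica_goldbach_hasta(n):
--     """Verifica la conjetura de Goldbach hasta un numero n (sieve-based)."""
--     composite = set()
--     for d in range(2, n + 1):
--         for m in range(2 * d, n + 1, d):
--             composite.add(m)
--     primes = [p for p in range(2, n + 1) if p not in composite]
--     prime_set = set(primes)
--     resultados = {}
--     for i in range(4, n + 1, 2):
--         for p in primes:
--             if i - p in prime_set:
--                 resultados[i] = (p, i - p)
--                 break
--         else:
--             raise ValueError(f"La conjetura de Goldbach no se cumple para {i}!")
--     return resultados
-- ===== Notes on version B (the rewrite author's own statement) =====
-- stated objective: faster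
-- what changed: Replaces per-number 6k±1 trial-division primality testing and O(π(n)) list-membership scans inside the decomposition loop by a single sieve that marks all multiples once, a prime set for O(1) membership, and the same ascending first-prime scan.
import Mathlib
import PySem

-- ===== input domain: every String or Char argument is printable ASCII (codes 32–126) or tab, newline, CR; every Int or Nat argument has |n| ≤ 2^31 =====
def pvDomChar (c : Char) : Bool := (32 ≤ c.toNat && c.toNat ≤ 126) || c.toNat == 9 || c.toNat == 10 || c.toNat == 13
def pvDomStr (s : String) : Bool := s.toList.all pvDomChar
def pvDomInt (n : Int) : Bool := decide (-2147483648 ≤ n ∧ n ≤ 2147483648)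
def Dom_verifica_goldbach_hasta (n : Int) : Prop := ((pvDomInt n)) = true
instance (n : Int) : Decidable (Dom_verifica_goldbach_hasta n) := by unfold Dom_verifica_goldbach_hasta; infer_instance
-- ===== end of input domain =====

-- B replaces A's per-number trial-division primality test and O(π(n)) list-membership scans by one
-- sieve of multiples plus set membership (objective: faster). Python A raises ValueError only on an
-- even number with no prime decomposition (no such n exists in Dom); B raises at the same place;
-- both ports skip such an entry identically, so the equivalence below is unconditional.

-- ===== PORT A =====
-- while i * i <= n: … i += 6   (the 0 < i conjunct only makes the recursion well-founded; the loop
-- is entered with i = 5 and i only grows, so it is always true when the Python loop runs)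
def esPrimoLoop (n i : Int) : Bool :=
  if h : 0 < i ∧ i * i ≤ n then
    if PySem.Int.mod n i == 0 || PySem.Int.mod n (i + 2) == 0 then false
    else esPrimoLoop n (i + 6)
  else true
termination_by (n + 1 - i * i).toNat
decreasing_by
  obtain ⟨h1, h2⟩ := h
  have key : (i + 6) * (i + 6) = i * i + (12 * i + 36) := by ring
  rw [key]
  set s := i * i
  omega

def es_primo (n : Int) : Bool :=
  if n ≤ 1 then false
  else if n ≤ 3 then true
  else if PySem.Int.mod n 2 == 0 || PySem.Int.mod n 3 == 0 then false
  else esPrimoLoop n 5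

def genera_lista_primos (n : Int) : List Int :=
  (PySem.List.pyRange 2 (n + 1) 1).filter (fun i => es_primo i)

-- for primo in lista_primos: if n - primo in lista_primos: return …
def descomponerAux (n : Int) (lista_primos : List Int) : List Int → Option (Int × Int)
  | [] => none
  | primo :: rest =>
    if lista_primos.contains (n - primo) then some (primo, n - primo)
    else descomponerAux n lista_primos rest

def descomponer_en_primos (n : Int) (lista_primos : List Int) : Option (Int × Int) :=
  descomponerAux n lista_primos lista_primos

def verifica_goldbach_hasta (n : Int) : List (Int × Int × Int) :=
  let primos_hasta_n := genera_lista_primos n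
  (((PySem.List.pyRange 4 (n + 1) 2).foldl (fun res i =>
      match descomponer_en_primos i primos_hasta_n with
      | some d => res.insert i d
      | none => res)   -- Python raises ValueError here (unreachable for n in Dom)
    (PySem.Dict.empty : PySem.Dict Int (Int × Int)))).items

-- ===== PORT B =====
-- composite = set(); for d in range(2, n+1): for m in range(2*d, n+1, d): composite.add(m)
def compositeSet (n : Int) : PySem.Set Int :=
  (PySem.List.pyRange 2 (n + 1) 1).foldl
    (fun s d => (PySem.List.pyRange (2 * d) (n + 1) d).foldl (fun s m => PySem.Set.add s m) s)
    PySem.Set.empty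

def primesB (n : Int) : List Int :=
  (PySem.List.pyRange 2 (n + 1) 1).filter (fun p => !(PySem.Set.contains (compositeSet n) p))

-- for p in primes: if i - p in prime_set: resultados[i] = (p, i - p); break
def goldFirst (i : Int) (primeSet : PySem.Set Int) : List Int → Option (Int × Int)
  | [] => none
  | p :: rest =>
    if PySem.Set.contains primeSet (i - p) then some (p, i - p)
    else goldFirst i primeSet rest

def verifica_goldbach_hasta_alt (n : Int) : List (Int × Int × Int) :=
  let primes := primesB n
  let primeSet := PySem.Set.ofList primes
  (((PySem.List.pyRange 4 (n + 1) 2).foldl (fun res i =>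
      match goldFirst i primeSet primes with
      | some d => res.insert i d
      | none => res)   -- Python raises ValueError here (unreachable for n in Dom)
    (PySem.Dict.empty : PySem.Dict Int (Int × Int)))).items

-- ===== PRECONDITION & SPEC =====
def Spec_verifica_goldbach_hasta (n : Int) (out : List (Int × Int × Int)) : Prop := out = verifica_goldbach_hasta_alt n
instance (n : Int) (out : List (Int × Int × Int)) : Decidable (Spec_verifica_goldbach_hasta n out) := by unfold Spec_verifica_goldbach_hasta; infer_instance

-- ===== CLAIM (what is proved, stated in full; the proofs are below) =====
def Claim_equal_verifica_goldbach_hasta : Prop := ∀ (n : Int), Dom_verifica_goldbach_hasta n → Spec_verifica_goldbach_hasta n (verifica_goldbach_hasta n)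

-- ===== LEMMAS AND PROOFS =====

-- the common mathematical characterisation both primality mechanisms decide
def IntPrime (m : Int) : Prop := 2 ≤ m ∧ ∀ d : Int, 1 < d → d < m → ¬ d ∣ m

-- A's 6k±1 trial-division loop returns false as soon as a divisor of the right shape exists
lemma loop_false_of_div (m p : Int) (hdvd : p ∣ m) (hpp : p * p ≤ m)
    (hp6 : p % 6 = 1 ∨ p % 6 = 5) :
    ∀ i : Int, 0 < i → i % 6 = 5 → i ≤ p → esPrimoLoop m i = false := by
  intro i
  induction i using esPrimoLoop.induct (n := m) with
  | case1 i h hchk =>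
    intro _ _ _
    rw [esPrimoLoop, dif_pos h, if_pos hchk]
  | case2 i h hchk ih =>
    intro h1 h2 h3
    rw [esPrimoLoop, dif_pos h, if_neg hchk]
    have hni : PySem.Int.mod m i ≠ 0 ∧ PySem.Int.mod m (i + 2) ≠ 0 := by
      constructor <;> intro hc <;> simp [hc] at hchk
    have hpi : p ≠ i := by
      intro he; subst he
      exact hni.1 ((PySem.Int.mod_eq_zero_iff_dvd m p).mpr hdvd)
    have hpi2 : p ≠ i + 2 := by
      intro he; subst he
      exact hni.2 ((PySem.Int.mod_eq_zero_iff_dvd m (i + 2)).mpr hdvd)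
    exact ih (by omega) (by omega) (by omega)
  | case3 i h =>
    intro h1 h2 h3
    exfalso
    apply h
    refine ⟨h1, ?_⟩
    calc i * i ≤ p * p := by nlinarith
    _ ≤ m := hpp

-- if the loop returns false, m has a nontrivial divisor
lemma div_of_loop_false (m : Int) :
    ∀ i : Int, 5 ≤ i → esPrimoLoop m i = false → ∃ d : Int, 1 < d ∧ d < m ∧ d ∣ m := by
  intro i
  induction i using esPrimoLoop.induct (n := m) with
  | case1 i h hchk =>
    intro h5 _
    have hii : i * i ≤ m := h.2
    have h5i : 5 * i ≤ i * i := by nlinarith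
    rcases Bool.or_eq_true_iff.mp hchk with hc | hc
    · refine ⟨i, by omega, by omega, (PySem.Int.mod_eq_zero_iff_dvd m i).mp (by simpa using hc)⟩
    · refine ⟨i + 2, by omega, by omega, (PySem.Int.mod_eq_zero_iff_dvd m (i + 2)).mp (by simpa using hc)⟩
  | case2 i h hchk ih =>
    intro h5 hf
    rw [esPrimoLoop, dif_pos h, if_neg hchk] at hf
    exact ih (by omega) hf
  | case3 i h =>
    intro h5 hf
    rw [esPrimoLoop, dif_neg h] at hf
    exact absurd hf (by simp)

lemma not_intprime_iff (m : Int) (h2 : 2 ≤ m) :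
    ¬ IntPrime m ↔ ∃ d : Int, 1 < d ∧ d < m ∧ d ∣ m := by
  unfold IntPrime
  constructor
  · intro h
    by_contra hno
    exact h ⟨h2, fun d hd1 hd2 hdvd => hno ⟨d, hd1, hd2, hdvd⟩⟩
  · rintro ⟨d, hd1, hd2, hdvd⟩ ⟨_, hall⟩
    exact hall d hd1 hd2 hdvd

-- a composite m ≥ 5 not divisible by 2 or 3 has a prime divisor p with p² ≤ m and p ≡ ±1 (mod 6)
lemma exists_good_factor (m : Int) (h5 : 5 ≤ m) (h2 : ¬ (2:Int) ∣ m) (h3 : ¬ (3:Int) ∣ m)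
    (hcomp : ∃ d : Int, 1 < d ∧ d < m ∧ d ∣ m) :
    ∃ p : Int, p ∣ m ∧ p * p ≤ m ∧ (p % 6 = 1 ∨ p % 6 = 5) ∧ 5 ≤ p := by
  obtain ⟨d, hd1, hd2, hdvd⟩ := hcomp
  set N := m.toNat with hN
  have hmN : (N : Int) = m := by omega
  have hdN : d.toNat ∣ N := by
    have : ((d.toNat : Int)) ∣ ((N : Int)) := by
      rw [hmN]; rwa [(by omega : ((d.toNat : Int)) = d)]
    exact_mod_cast this
  have hnotp : ¬ Nat.Prime N := by
    intro hp
    have := (Nat.prime_def_lt.mp hp).2 d.toNat (by omega) hdN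
    omega
  have hp : Nat.Prime N.minFac := Nat.minFac_prime (by omega)
  have hpdvd : N.minFac ∣ N := Nat.minFac_dvd N
  have hpsq : N.minFac ^ 2 ≤ N := Nat.minFac_sq_le_self (by omega) hnotp
  set p := N.minFac with hpdef
  clear_value p
  have hp2 : p ≠ 2 := by
    intro he
    apply h2
    have : ((p : Int)) ∣ ((N : Int)) := by exact_mod_cast hpdvd
    rw [hmN] at this; rw [he] at this; exact_mod_cast this
  have hp3 : p ≠ 3 := by
    intro he
    apply h3
    have : ((p : Int)) ∣ ((N : Int)) := by exact_mod_cast hpdvd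
    rw [hmN] at this; rw [he] at this; exact_mod_cast this
  have hpge : 2 ≤ p := hp.two_le
  have hmod2 : p % 2 ≠ 0 := by
    intro he
    rcases (hp.eq_one_or_self_of_dvd 2 (by omega)) with h | h <;> omega
  have hmod3 : p % 3 ≠ 0 := by
    intro he
    rcases (hp.eq_one_or_self_of_dvd 3 (by omega)) with h | h <;> omega
  refine ⟨(p : Int), ?_, ?_, ?_, ?_⟩
  · have : ((p : Int)) ∣ ((N : Int)) := by exact_mod_cast hpdvd
    rwa [hmN] at this
  · have : ((p * p : Nat) : Int) ≤ ((N : Int)) := by exact_mod_cast (by nlinarith [hpsq] : p * p ≤ N)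
    push_cast at this; omega
  · omega
  · omega

-- es_primo decides IntPrime
lemma es_primo_iff (m : Int) : es_primo m = true ↔ IntPrime m := by
  unfold es_primo
  split_ifs with hle1 hle3 hdiv
  · simp only [false_iff]
    intro hp; exact absurd hp.1 (by omega)
  · simp only [true_iff]
    refine ⟨by omega, fun d hd1 hd2 hdvd => ?_⟩
    obtain ⟨c, hc⟩ := hdvd
    interval_cases m <;> (interval_cases d; all_goals omega)
  · simp only [false_iff]
    rcases Bool.or_eq_true_iff.mp hdiv with hc | hc
    · have h2 : (2:Int) ∣ m := (PySem.Int.mod_eq_zero_iff_dvd m 2).mp (by simpa using hc)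
      intro hp; exact hp.2 2 (by omega) (by omega) h2
    · have h3 : (3:Int) ∣ m := (PySem.Int.mod_eq_zero_iff_dvd m 3).mp (by simpa using hc)
      intro hp; exact hp.2 3 (by omega) (by omega) h3
  · -- m ≥ 4, not divisible by 2 or 3, hence m ≥ 5
    simp only [Bool.or_eq_true, beq_iff_eq, not_or, PySem.Int.mod_eq_zero_iff_dvd] at hdiv
    obtain ⟨h2, h3⟩ := hdiv
    have h5 : 5 ≤ m := by
      rcases (by omega : m = 4 ∨ 5 ≤ m) with h | h
      · exfalso; apply h2; omega
      · exact h
    constructor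
    · intro htrue
      by_contra hnp
      obtain ⟨p, hpd, hpp, hp6, hp5⟩ :=
        exists_good_factor m h5 h2 h3 ((not_intprime_iff m (by omega)).mp hnp)
      have := loop_false_of_div m p hpd hpp hp6 5 (by omega) (by omega) hp5
      rw [htrue] at this; exact absurd this (by simp)
    · intro hp
      by_contra hfalse
      obtain ⟨d, hd1, hd2, hdvd⟩ :=
        div_of_loop_false m 5 (by omega) (by simpa using hfalse)
      exact hp.2 d hd1 hd2 hdvd

-- membership in the nested sieve fold
lemma mem_sieve_fold (n : Int) (l : List Int) :
    ∀ (s : PySem.Set Int) (x : Int),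
      x ∈ l.foldl
        (fun s d => (PySem.List.pyRange (2 * d) (n + 1) d).foldl (fun s m => PySem.Set.add s m) s)
        s ↔ x ∈ s ∨ ∃ d ∈ l, x ∈ PySem.List.pyRange (2 * d) (n + 1) d := by
  induction l with
  | nil => simp
  | cons d rest ih =>
    intro s x
    rw [List.foldl_cons, ih]
    have hupd : (PySem.List.pyRange (2 * d) (n + 1) d).foldl (fun s m => PySem.Set.add s m) s
        = PySem.Set.update s (PySem.List.pyRange (2 * d) (n + 1) d) := rfl
    rw [hupd]
    simp only [PySem.Set.mem_update, List.mem_cons]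
    constructor
    · rintro ((h | h) | ⟨e, he, hx⟩)
      · exact Or.inl h
      · exact Or.inr ⟨d, Or.inl rfl, h⟩
      · exact Or.inr ⟨e, Or.inr he, hx⟩
    · rintro (h | ⟨e, (rfl | he), hx⟩)
      · exact Or.inl (Or.inl h)
      · exact Or.inl (Or.inr hx)
      · exact Or.inr ⟨e, he, hx⟩

lemma mem_compositeSet (n x : Int) (h2 : 2 ≤ x) (hn : x ≤ n) :
    x ∈ compositeSet n ↔ ¬ IntPrime x := by
  unfold compositeSet
  rw [mem_sieve_fold, not_intprime_iff x h2]
  simp only [PySem.Set.empty]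
  constructor
  · rintro (h | ⟨d, hd, hx⟩)
    · simp at h
    · rw [PySem.List.mem_pyRange_one] at hd
      rw [PySem.List.mem_pyRange_iff_of_pos (by omega)] at hx
      obtain ⟨h1, _, hdd⟩ := hx
      obtain ⟨c, hc⟩ := hdd
      exact ⟨d, by omega, by omega, ⟨c + 2, by linarith⟩⟩
  · rintro ⟨d, hd1, hd2, hdvd⟩
    right
    refine ⟨d, ?_, ?_⟩
    · rw [PySem.List.mem_pyRange_one]; omega
    · rw [PySem.List.mem_pyRange_iff_of_pos (by omega)]
      obtain ⟨c, hc⟩ := hdvd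
      have hc2 : 2 ≤ c := by nlinarith
      refine ⟨by nlinarith, by omega, ⟨c - 2, by rw [hc]; ring⟩⟩

-- the two prime lists coincide
lemma primes_eq (n : Int) : primesB n = genera_lista_primos n := by
  unfold primesB genera_lista_primos
  apply List.filter_congr
  intro x hx
  rw [PySem.List.mem_pyRange_one] at hx
  by_cases hp : IntPrime x
  · have hnot : x ∉ compositeSet n := fun h => (mem_compositeSet n x (by omega) (by omega)).mp h hp
    simp [hnot, (es_primo_iff x).mpr hp]
  · have hin : x ∈ compositeSet n := (mem_compositeSet n x (by omega) (by omega)).mpr hp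
    have : es_primo x ≠ true := fun h => hp ((es_primo_iff x).mp h)
    simp [hin, Bool.eq_false_iff.mpr this]

-- B's break-on-first-hit loop computes A's descomponer on the same list
lemma goldFirst_eq_aux (i : Int) (L : List Int) :
    ∀ l : List Int, goldFirst i (PySem.Set.ofList L) l = descomponerAux i L l := by
  intro l
  induction l with
  | nil => rfl
  | cons p rest ih =>
    unfold goldFirst descomponerAux
    have hc : PySem.Set.contains (PySem.Set.ofList L) (i - p) = L.contains (i - p) := by
      rw [PySem.Set.contains_eq_decide]
      simp [PySem.Set.mem_ofList]
    rw [hc, ih]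

-- ===== VERDICT (by name: the statement is the Claim_ definition above) =====
theorem verifica_goldbach_hasta_spec : Claim_equal_verifica_goldbach_hasta := by
  intro n _
  unfold Spec_verifica_goldbach_hasta verifica_goldbach_hasta verifica_goldbach_hasta_alt
  rw [primes_eq]
  dsimp only
  congr 1
  apply PySem.List.foldl_congr_mem
  intro acc i _
  rw [show descomponer_en_primos i (genera_lista_primos n)
      = descomponerAux i (genera_lista_primos n) (genera_lista_primos n) from rfl]
  rw [goldFirst_eq_aux]
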